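-- pv_equiv track=rewrite | github.com/vaveave/advent-of-code | aoc/solutions/2015/11/__main__.py | validation_rule_3
-- ===== SOURCE A (Python) =====
-- def validation_rule_3(psw):
--     counter, char = 0, ""
--     for i in range(len(psw) - 1):
--         if (psw[i] == psw[i + 1]) & (psw[i] != char):
--             counter += 1
--             char = psw[i]
--         if counter == 2:
--             return True
--     return False
-- ===== SOURCE B (Python) =====
-- def validation_rule_3(psw):
--     pairs = set()
--     for i in range(len(psw) - 1):
--         if psw[i] == psw[i + 1]:
--             pairs.add(psw[i])
--     return len(pairs) >= 2
-- ===== Notes on version B (the rewrite author's own statement) =====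
-- stated objective: simpler
-- what changed: Replaces the counter/last-seen-char state machine with an early return by a single pass that collects the distinct characters forming adjacent doubles into a set and checks its size at the end.
import Mathlib
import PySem

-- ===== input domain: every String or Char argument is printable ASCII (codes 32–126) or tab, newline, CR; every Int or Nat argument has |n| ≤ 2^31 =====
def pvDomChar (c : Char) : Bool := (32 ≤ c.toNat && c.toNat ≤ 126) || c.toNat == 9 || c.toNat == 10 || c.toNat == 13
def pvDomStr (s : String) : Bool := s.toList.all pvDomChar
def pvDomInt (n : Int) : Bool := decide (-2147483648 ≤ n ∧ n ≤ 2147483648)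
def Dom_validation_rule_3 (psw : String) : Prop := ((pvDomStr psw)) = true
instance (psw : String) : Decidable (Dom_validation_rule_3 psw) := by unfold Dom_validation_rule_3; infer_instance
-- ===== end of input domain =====

-- B replaces A's counter/last-pair-char state machine (with early return) by collecting the
-- distinct characters that form adjacent doubles into a set and testing its size at the end.

-- ===== PORT A =====
-- Loop over range(len(psw)-1) with state (counter, char) and early return when counter == 2.
-- psw[i] in Python is a one-char string, so `char` (initially "") stays a String and psw[i] is
-- ported as String.ofList [a]; comparing those singleton strings is Python's psw[i] comparisons.
-- Indices i and i+1 are always in range on pyRange 0 (len-1) 1, so the `none` branch is unreachable.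
def validation_rule_3_loopA (cs : List Char) : List Int → Int → String → Bool
  | [], _, _ => false
  | i :: rest, counter, char =>
    match PySem.List.pyGet? cs i, PySem.List.pyGet? cs (i + 1) with
    | some a, some b =>
      let st : Int × String :=
        if (a == b) && !(String.ofList [a] == char) then (counter + 1, String.ofList [a])
        else (counter, char)
      if st.1 == 2 then true else validation_rule_3_loopA cs rest st.1 st.2
    | _, _ => false

def validation_rule_3 (psw : String) : Bool :=
  validation_rule_3_loopA psw.toList
    (PySem.List.pyRange 0 ((psw.toList.length : Int) - 1) 1) 0 ""

-- ===== PORT B =====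
-- One pass: add psw[i] to a set whenever psw[i] == psw[i+1]; return len(set) >= 2.
def validation_rule_3_stepB (cs : List Char) (s : PySem.Set Char) (i : Int) : PySem.Set Char :=
  match PySem.List.pyGet? cs i, PySem.List.pyGet? cs (i + 1) with
  | some a, some b => if a == b then PySem.Set.add s a else s
  | _, _ => s

def validation_rule_3_alt (psw : String) : Bool :=
  let cs := psw.toList
  let pairs : PySem.Set Char :=
    (PySem.List.pyRange 0 ((cs.length : Int) - 1) 1).foldl (validation_rule_3_stepB cs)
      PySem.Set.empty
  decide (2 ≤ pairs.length)

-- ===== PRECONDITION & SPEC =====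
def Spec_validation_rule_3 (psw : String) (out : Bool) : Prop := out = validation_rule_3_alt psw
instance (psw : String) (out : Bool) : Decidable (Spec_validation_rule_3 psw out) := by unfold Spec_validation_rule_3; infer_instance

-- ===== CLAIM (what is proved, stated in full; the proofs are below) =====
def Claim_equal_validation_rule_3 : Prop := ∀ (psw : String), Dom_validation_rule_3 psw → Spec_validation_rule_3 psw (validation_rule_3 psw)

-- ===== LEMMAS AND PROOFS =====

theorem length_le_add (s : PySem.Set Char) (a : Char) :
    s.length ≤ (PySem.Set.add s a).length := by
  unfold PySem.Set.add
  split <;> simp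

theorem length_le_foldl (cs : List Char) (L : List Int) (s : PySem.Set Char) :
    s.length ≤ (L.foldl (validation_rule_3_stepB cs) s).length := by
  induction L generalizing s with
  | nil => simp
  | cons i rest ih =>
    refine le_trans ?_ (ih (validation_rule_3_stepB cs s i))
    unfold validation_rule_3_stepB
    split
    · split
      · exact length_le_add s _
      · exact le_rfl
    · exact le_rfl

theorem ofList_singleton_inj {a c : Char} (h : String.ofList [a] = String.ofList [c]) : a = c := by
  have := congrArg String.toList h
  simp at this; exact this

theorem ofList_singleton_ne_empty (a : Char) : ¬ (String.ofList [a] = "") := by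
  intro h
  have := congrArg String.toList h
  simp at this

-- Invariant relating A's (counter, char) state to B's set of collected pair characters:
-- either nothing counted yet (counter 0, char "", empty set) or exactly one pair character c
-- counted (counter 1, char = "c", set = {c}).
theorem loop_eq (cs : List Char) (L : List Int)
    (hv : ∀ i ∈ L, (PySem.List.pyGet? cs i).isSome ∧ (PySem.List.pyGet? cs (i + 1)).isSome)
    (counter : Int) (char : String) (s : PySem.Set Char)
    (hR : (counter = 0 ∧ char = "" ∧ s = []) ∨
          (counter = 1 ∧ ∃ c, char = String.ofList [c] ∧ s = [c])) :
    validation_rule_3_loopA cs L counter char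
      = decide (2 ≤ (L.foldl (validation_rule_3_stepB cs) s).length) := by
  induction L generalizing counter char s with
  | nil =>
    rcases hR with ⟨_, _, hs⟩ | ⟨_, c, _, hs⟩ <;>
      simp [validation_rule_3_loopA, hs]
  | cons i rest ih =>
    obtain ⟨h1, h2⟩ := hv i (List.mem_cons_self ..)
    obtain ⟨a, ha⟩ := Option.isSome_iff_exists.mp h1
    obtain ⟨b, hb⟩ := Option.isSome_iff_exists.mp h2
    have hv' : ∀ j ∈ rest, (PySem.List.pyGet? cs j).isSome ∧ (PySem.List.pyGet? cs (j + 1)).isSome :=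
      fun j hj => hv j (List.mem_cons_of_mem _ hj)
    rw [validation_rule_3_loopA, ha, hb]
    simp only [List.foldl_cons]
    by_cases hab : a = b
    · subst hab
      rcases hR with ⟨hc0, hch, hs⟩ | ⟨hc1, c, hch, hs⟩
      · -- first pair seen: counter 0 → 1, char "" → "a", set ∅ → {a}
        subst hc0; subst hch; subst hs
        have hcond : (a == a && !(String.ofList [a] == "")) = true := by
          simp [ofList_singleton_ne_empty a]
        have hstep : validation_rule_3_stepB cs [] i = [a] := by
          simp [validation_rule_3_stepB, ha, hb, PySem.Set.add, PySem.Set.contains]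
        simp only [hcond, hstep]
        rw [if_neg (by simp)]
        exact ih hv' (0 + 1) (String.ofList [a]) [a] (Or.inr ⟨by norm_num, a, rfl, rfl⟩)
      · subst hc1; subst hch; subst hs
        by_cases hac : a = c
        · -- same char as the last counted pair: A skips, B's add is a no-op
          subst hac
          have hcond : (a == a && !(String.ofList [a] == String.ofList [a])) = false := by simp
          have hstep : validation_rule_3_stepB cs [a] i = [a] := by
            simp [validation_rule_3_stepB, ha, hb, PySem.Set.add, PySem.Set.contains]
          simp only [hcond, hstep]
          rw [if_neg (by simp)]
          exact ih hv' 1 (String.ofList [a]) [a] (Or.inr ⟨rfl, a, rfl, rfl⟩)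
        · -- second distinct pair char: A returns True; B's set reaches size 2 and never shrinks
          have hne : String.ofList [a] ≠ String.ofList [c] :=
            fun h => hac (ofList_singleton_inj h)
          have hcond : (a == a && !(String.ofList [a] == String.ofList [c])) = true := by
            have hb' : (String.ofList [a] == String.ofList [c]) = false :=
              beq_eq_false_iff_ne.mpr hne
            simp [hb']
          have hstep : validation_rule_3_stepB cs [c] i = [c, a] := by
            simp [validation_rule_3_stepB, ha, hb, PySem.Set.add, PySem.Set.contains, hac]
          simp only [hcond, hstep]
          rw [if_pos (by simp)]
          have hlen := length_le_foldl cs rest [c, a]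
          simp only [List.length_cons, List.length_nil] at hlen
          symm
          simpa using le_trans (by omega) hlen
    · -- no pair at i: both sides keep their state
      have hcond : (a == b && !(String.ofList [a] == char)) = false := by simp [hab]
      have hstep : validation_rule_3_stepB cs s i = s := by
        simp [validation_rule_3_stepB, ha, hb, hab]
      rcases hR with ⟨hc0, hch, hs⟩ | ⟨hc1, c, hch, hs⟩
      · subst hc0; subst hch
        simp only [hcond, hstep]
        rw [if_neg (by simp)]
        exact ih hv' 0 "" s (Or.inl ⟨rfl, rfl, hs⟩)
      · subst hc1; subst hch
        simp only [hcond, hstep]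
        rw [if_neg (by simp)]
        exact ih hv' 1 (String.ofList [c]) s (Or.inr ⟨rfl, c, rfl, hs⟩)

theorem range_valid (cs : List Char) :
    ∀ i ∈ PySem.List.pyRange 0 ((cs.length : Int) - 1) 1,
      (PySem.List.pyGet? cs i).isSome ∧ (PySem.List.pyGet? cs (i + 1)).isSome := by
  intro i hi
  rw [PySem.List.mem_pyRange_one] at hi
  constructor
  · rw [PySem.List.pyGet?_of_nonneg cs (by omega)]
    simp [show i.toNat < cs.length by omega]
  · rw [PySem.List.pyGet?_of_nonneg cs (by omega)]
    simp [show (i + 1).toNat < cs.length by omega]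

-- ===== VERDICT (by name: the statement is the Claim_ definition above) =====
theorem validation_rule_3_spec : Claim_equal_validation_rule_3 := by
  intro psw _
  unfold Spec_validation_rule_3 validation_rule_3 validation_rule_3_alt
  exact loop_eq psw.toList _ (range_valid psw.toList) 0 "" [] (Or.inl ⟨rfl, rfl, rfl⟩)
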